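-- pv_equiv track=rewrite | github.com/vanessachaptchet/Sequencing_Pipeline | processor/output_writer.py | evaluate_run_status
-- ===== SOURCE A (Python) =====
-- def evaluate_run_status(sample_results):
--     total = len(sample_results)
--     failed = 0
--     for r in sample_results:
--         if r["status"] == "FAILED":
--             failed += 1
--
--     if total == 0:
--         return "FAILED"
--     if failed == 0:
--         return "SUCCESS"
--     if failed == total:
--         return "FAILED"
--     return "PARTIAL"
-- ===== SOURCE B (Python) =====
-- def evaluate_run_status(sample_results):
--     if not sample_results:
--         return "FAILED"
--     if all(r["status"] == "FAILED" for r in sample_results):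
--         return "FAILED"
--     if any(r["status"] == "FAILED" for r in sample_results):
--         return "PARTIAL"
--     return "SUCCESS"
-- ===== Notes on version B (the rewrite author's own statement) =====
-- stated objective: idiomatic
-- what changed: Replaces the counting accumulator with an empty guard plus short-circuiting all/any checks over the same predicate.
import Mathlib
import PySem

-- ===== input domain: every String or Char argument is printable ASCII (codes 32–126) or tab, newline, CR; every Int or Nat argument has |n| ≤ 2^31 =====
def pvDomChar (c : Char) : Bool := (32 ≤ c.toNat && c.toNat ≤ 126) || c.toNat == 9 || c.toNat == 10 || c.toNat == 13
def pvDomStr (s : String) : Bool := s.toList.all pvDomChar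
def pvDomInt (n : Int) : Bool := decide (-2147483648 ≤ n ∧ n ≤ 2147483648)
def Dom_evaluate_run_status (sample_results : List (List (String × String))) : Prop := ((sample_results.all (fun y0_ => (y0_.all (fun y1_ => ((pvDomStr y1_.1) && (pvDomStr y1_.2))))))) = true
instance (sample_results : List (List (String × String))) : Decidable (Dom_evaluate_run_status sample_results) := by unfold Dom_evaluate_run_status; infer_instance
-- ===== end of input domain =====

-- B replaces A's counting accumulator with an empty guard and short-circuiting all/any checks (idiomatic).

-- ===== PORT A =====
-- A counts the FAILED rows in one loop, then compares the count with 0 and with the length.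
def evaluate_run_status (sample_results : List (List (String × String))) : String :=
  let total := sample_results.length
  let failed := sample_results.foldl
    (fun acc r => if PySem.Dict.getD (PySem.Dict.mk r) "status" "" == "FAILED" then acc + 1 else acc) 0
  if total == 0 then "FAILED"
  else if failed == 0 then "SUCCESS"
  else if failed == total then "FAILED"
  else "PARTIAL"

-- ===== PORT B =====
def evaluate_run_status_alt (sample_results : List (List (String × String))) : String :=
  if sample_results.isEmpty then "FAILED"
  else if sample_results.all (fun r => PySem.Dict.getD (PySem.Dict.mk r) "status" "" == "FAILED") then "FAILED"
  else if sample_results.any (fun r => PySem.Dict.getD (PySem.Dict.mk r) "status" "" == "FAILED") then "PARTIAL"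
  else "SUCCESS"

-- ===== PRECONDITION & SPEC =====
-- Pre_ excludes inputs where some row lacks a "status" key: there Python A (and B) raise KeyError.
def Pre_evaluate_run_status (sample_results : List (List (String × String))) : Prop :=
  ∀ r ∈ sample_results, (PySem.Dict.get? (PySem.Dict.mk r) "status").isSome
instance (sample_results : List (List (String × String))) : Decidable (Pre_evaluate_run_status sample_results) := by unfold Pre_evaluate_run_status; infer_instance
def pvWitness_evaluate_run_status : (List (List (String × String))) :=
  [[("status", "FAILED")], [("status", "SUCCESS")]]

def Spec_evaluate_run_status (sample_results : List (List (String × String))) (out : String) : Prop := out = evaluate_run_status_alt sample_results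
instance (sample_results : List (List (String × String))) (out : String) : Decidable (Spec_evaluate_run_status sample_results out) := by unfold Spec_evaluate_run_status; infer_instance

-- ===== CLAIM (what is proved, stated in full; the proofs are below) =====
def Claim_equal_evaluate_run_status : Prop := ∀ (sample_results : List (List (String × String))), Dom_evaluate_run_status sample_results → Pre_evaluate_run_status sample_results → Spec_evaluate_run_status sample_results (evaluate_run_status sample_results)

-- ===== LEMMAS AND PROOFS =====

theorem pv_foldl_count (p : List (String × String) → Bool)
    (l : List (List (String × String))) (n : Nat) :
    l.foldl (fun acc r => if p r then acc + 1 else acc) n = n + l.countP p := by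
  induction l generalizing n with
  | nil => simp
  | cons h t ih =>
    by_cases hp : p h <;> simp [hp, ih]; omega

-- ===== VERDICT (by name: the statement is the Claim_ definition above) =====
theorem evaluate_run_status_spec : Claim_equal_evaluate_run_status := by
  intro l _ _
  unfold Spec_evaluate_run_status evaluate_run_status evaluate_run_status_alt
  set p : List (String × String) → Bool :=
    fun r => PySem.Dict.getD (PySem.Dict.mk r) "status" "" == "FAILED" with hp
  simp only [pv_foldl_count, Nat.zero_add]
  rw [show (fun r : List (String × String) => PySem.Dict.getD (PySem.Dict.mk r) "status" "" == "FAILED") = p from hp.symm]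
  rcases eq_or_ne l [] with rfl | hne
  · simp
  · have hEmp : l.isEmpty = false := by simp [hne]
    have hLen : (l.length == 0) = false := by
      simp [List.length_eq_zero_iff, hne]
    simp only [hEmp, hLen, Bool.false_eq_true, if_false]
    by_cases hall : ∀ r ∈ l, p r = true
    · have hc : l.countP p = l.length := List.countP_eq_length.mpr hall
      have hallb : l.all p = true := List.all_eq_true.mpr hall
      simp only [hc, hLen, Bool.false_eq_true, if_false, beq_self_eq_true, if_true, hallb]
    · have hlt : (l.countP p == l.length) = false := by
        simp only [beq_eq_false_iff_ne]
        intro h; exact hall (List.countP_eq_length.mp h)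
      have hallb : l.all p = false := by
        rw [← Bool.not_eq_true, List.all_eq_true]; exact hall
      by_cases hz : l.countP p = 0
      · have hanyb : l.any p = false := by
          rw [← Bool.not_eq_true, List.any_eq_true]
          rw [← List.countP_pos_iff (p := p)]; omega
        have hz' : (l.countP p == 0) = true := by simpa using hz
        simp only [hz', if_true, hallb, hanyb, Bool.false_eq_true, if_false]
      · have hanyb : l.any p = true := by
          rw [List.any_eq_true, ← List.countP_pos_iff (p := p)]; omega
        have hz' : (l.countP p == 0) = false := by simpa using hz
        simp only [hz', hlt, hallb, Bool.false_eq_true, if_false, hanyb, if_true]
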